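-- pv_equiv track=rewrite | github.com/sakura-team/sakura | sakura/hub/mixins/opinstance.py | aggregate_events
-- ===== SOURCE A (Python) =====
-- def aggregate_events(events):
--     final_status_event = None
--     for event in events:
--         assert event is not None, "Got 'None' event!"
--         if (final_status_event, event) == (None, 'enabled'):
--             final_status_event = 'enabled'
--         elif (final_status_event, event) == (None, 'disabled'):
--             final_status_event = 'disabled'
--         elif (final_status_event, event) == ('enabled', 'disabled'):
--             final_status_event = None
--         elif (final_status_event, event) == ('disabled', 'enabled'):
--             final_status_event = None
--         else:
--             assert final_status_event != event, "Got repeated operator event: " + event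
--     if final_status_event is None:
--         # remove 'enabled' and 'disabled' from list
--         events = list(event for event in events if event not in ('enabled', 'disabled'))
--     else:
--         # only keep the last status event
--         rev_events = []
--         found = False
--         for event in reversed(events):
--             if event in ('enabled', 'disabled'):
--                 if found:
--                     continue    # discard
--                 if event != final_status_event:
--                     continue    # discard
--                 # found last status event
--                 found = True
--             rev_events.append(event)
--         events = list(reversed(rev_events))
--     # remove duplicated events (keep last occurence)
--     rev_events = []
--     for event in reversed(events):
--         if event not in rev_events:
--             rev_events.append(event)
--     events = list(reversed(rev_events))
--     return events
-- ===== SOURCE B (Python) =====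
-- def aggregate_events(events):
--     final_status_event = None
--     for event in events:
--         assert event is not None, "Got 'None' event!"
--         if final_status_event is None:
--             if event in ('enabled', 'disabled'):
--                 final_status_event = event
--         elif event in ('enabled', 'disabled'):
--             if final_status_event == event:
--                 raise AssertionError("Got repeated operator event: " + event)
--             final_status_event = None
--     return [e for i, e in enumerate(events)
--             if e not in events[i + 1:]
--             and (e not in ('enabled', 'disabled') or e == final_status_event)]
-- ===== Notes on version B (the rewrite author's own statement) =====
-- stated objective: simpler
-- what changed: The status fold is decomposed by state instead of by pair-pattern, and A's three list passes (branchy reversed status-scan, reversed keep-first dedup, final reverse) are replaced by one forward comprehension that keeps an event iff it is its own last occurrence and, for status events, equals the final status.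
import Mathlib
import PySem

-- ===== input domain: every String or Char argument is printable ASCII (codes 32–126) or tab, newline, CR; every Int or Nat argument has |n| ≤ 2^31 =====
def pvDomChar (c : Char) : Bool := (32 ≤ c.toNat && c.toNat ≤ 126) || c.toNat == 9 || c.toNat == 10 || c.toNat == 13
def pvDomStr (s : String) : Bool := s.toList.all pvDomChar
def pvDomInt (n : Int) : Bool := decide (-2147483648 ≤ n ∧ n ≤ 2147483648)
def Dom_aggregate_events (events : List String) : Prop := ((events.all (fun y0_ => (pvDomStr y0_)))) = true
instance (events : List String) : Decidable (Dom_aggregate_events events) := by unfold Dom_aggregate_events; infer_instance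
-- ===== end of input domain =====

-- B replaces A's three tail passes (reversed status scan, reversed keep-first dedup, reverse)
-- by one forward comprehension keeping each event's last occurrence; objective: simpler.

-- ===== PORT A =====
-- state machine of A's first loop; the final 'else' branch is Python's
-- 'assert final_status_event != event' (raises when st = some event, excluded by Pre_) and leaves st unchanged
def aeStep (st : Option String) (event : String) : Option String :=
  if st = none ∧ event = "enabled" then some "enabled"
  else if st = none ∧ event = "disabled" then some "disabled"
  else if st = some "enabled" ∧ event = "disabled" then none
  else if st = some "disabled" ∧ event = "enabled" then none
  else st

-- body of A's 'reversed(events)' loop keeping only the last status event equal to fs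
def aeKeepStep (fs : String) (acc : List String × Bool) (event : String) : List String × Bool :=
  if event = "enabled" ∨ event = "disabled" then
    if acc.2 then acc
    else if event ≠ fs then acc
    else (acc.1 ++ [event], true)
  else (acc.1 ++ [event], acc.2)

-- body of A's dedup loop over reversed(events)
def aeDedupStep (acc : List String) (event : String) : List String :=
  if event ∈ acc then acc else acc ++ [event]

def aggregate_events (events : List String) : List String :=
  let fse := events.foldl aeStep none
  let events1 :=
    match fse with
    | none => events.filter (fun e => !(e == "enabled" || e == "disabled"))
    | some fs => ((events.reverse.foldl (aeKeepStep fs) ([], false)).1).reverse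
  (events1.reverse.foldl aeDedupStep []).reverse

-- ===== PORT B =====
-- state machine of Source B's loop, decomposed by state; the 'raise' branch is unreachable under
-- Pre_ — its value is arbitrary and chosen as the unchanged state
def altStep (st : Option String) (event : String) : Option String :=
  match st with
  | none => if event = "enabled" ∨ event = "disabled" then some event else none
  | some fs => if event = "enabled" ∨ event = "disabled" then
                 (if fs = event then some fs else none)
               else some fs

def aggregate_events_alt (events : List String) : List String :=
  let fse := events.foldl altStep none
  (PySem.List.enumerate events 0).filterMap (fun p =>
    if ¬ p.2 ∈ PySem.List.slice events (some (p.1 + 1)) none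
       ∧ (¬ (p.2 = "enabled" ∨ p.2 = "disabled") ∨ some p.2 = fse)
    then some p.2 else none)

-- ===== PRECONDITION & SPEC =====
-- Pre_ excludes exactly the inputs on which A's 'assert final_status_event != event' fires
-- (an AssertionError): among the status events, some consecutive pair (1st&2nd, 3rd&4th, …) is equal.
def noPairRepeat : List String → Bool
  | a :: b :: t => (a != b) && noPairRepeat t
  | _ => true

def Pre_aggregate_events (events : List String) : Prop :=
  noPairRepeat (events.filter (fun e => e == "enabled" || e == "disabled")) = true

instance (events : List String) : Decidable (Pre_aggregate_events events) := by
  unfold Pre_aggregate_events; infer_instance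

def pvWitness_aggregate_events : List String := ["enabled", "stop", "disabled", "enabled"]

def Spec_aggregate_events (events : List String) (out : List String) : Prop := out = aggregate_events_alt events
instance (events : List String) (out : List String) : Decidable (Spec_aggregate_events events out) := by unfold Spec_aggregate_events; infer_instance

-- ===== CLAIM (what is proved, stated in full; the proofs are below) =====
def Claim_equal_aggregate_events : Prop := ∀ (events : List String), Dom_aggregate_events events → Pre_aggregate_events events → Spec_aggregate_events events (aggregate_events events)

-- ===== LEMMAS AND PROOFS =====

-- reference function: process events.reverse left to right (i.e. events from the right),
-- 'seen' collects all processed events, output is in reversed final order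
def coreR (fse : Option String) (seen : List String) : List String → List String
  | [] => []
  | e :: t =>
    if e ∈ seen then coreR fse seen t
    else if (e = "enabled" ∨ e = "disabled") ∧ some e ≠ fse then coreR fse (e :: seen) t
    else e :: coreR fse (e :: seen) t

theorem coreR_congr (fse : Option String) (s1 s2 : List String) (t : List String)
    (h : ∀ e, e ∈ s1 ↔ e ∈ s2) : coreR fse s1 t = coreR fse s2 t := by
  induction t generalizing s1 s2 with
  | nil => rfl
  | cons e t ih =>
    simp only [coreR]
    by_cases he : e ∈ s1
    · rw [if_pos he, if_pos ((h e).mp he), ih s1 s2 h]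
    · rw [if_neg he, if_neg (fun hc => he ((h e).mpr hc))]
      have h' : ∀ x, x ∈ e :: s1 ↔ x ∈ e :: s2 := by
        intro x; simp [h x]
      split_ifs with hb
      · exact ih _ _ h'
      · rw [ih _ _ h']

theorem state_lemma (l : List String) (st : Option String)
    (h : st = none ∨ st = some "enabled" ∨ st = some "disabled") :
    l.foldl aeStep st = l.foldl altStep st := by
  induction l generalizing st with
  | nil => rfl
  | cons e t ih =>
    have hstep : aeStep st e = altStep st e ∧
        (aeStep st e = none ∨ aeStep st e = some "enabled" ∨ aeStep st e = some "disabled") := by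
      rcases h with h | h | h <;> subst h <;>
        by_cases h1 : e = "enabled" <;> by_cases h2 : e = "disabled" <;>
          simp [aeStep, altStep, h1, h2]
    simp only [List.foldl_cons, hstep.1.symm]
    exact ih _ hstep.2

theorem state_mem (l : List String) (st : Option String)
    (h : st = none ∨ st = some "enabled" ∨ st = some "disabled") :
    l.foldl aeStep st = none ∨ l.foldl aeStep st = some "enabled" ∨
      l.foldl aeStep st = some "disabled" := by
  induction l generalizing st with
  | nil => exact h
  | cons e t ih =>
    rw [List.foldl_cons]
    apply ih
    rcases h with h | h | h <;> subst h <;>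
      by_cases h1 : e = "enabled" <;> by_cases h2 : e = "disabled" <;>
        simp [aeStep, h1, h2]

-- ===== B side: the forward comprehension equals coreR =====

theorem b_gen (fse : Option String) (l seen : List String) :
    ((PySem.List.enumerate l 0).filterMap (fun p =>
      if ¬ p.2 ∈ PySem.List.slice l (some (p.1 + 1)) none
         ∧ (¬ (p.2 = "enabled" ∨ p.2 = "disabled") ∨ some p.2 = fse)
         ∧ ¬ p.2 ∈ seen
      then some p.2 else none)).reverse
    = coreR fse seen l.reverse := by
  induction l using List.reverseRecOn generalizing seen with
  | nil => simp [coreR, PySem.List.enumerate_nil]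
  | append_singleton l x ih =>
    have hsl : PySem.List.slice (l ++ [x]) (some (0 + (l.length : Int) + 1)) none = [] := by
      rw [PySem.List.slice_from _ (by positivity)]
      have h1 : ((0 : Int) + (l.length : Int) + 1).toNat = l.length + 1 := by omega
      rw [h1]
      apply List.drop_eq_nil_of_le
      simp
    have hx : List.filterMap (fun p =>
        if ¬ p.2 ∈ PySem.List.slice (l ++ [x]) (some (p.1 + 1)) none
           ∧ (¬ (p.2 = "enabled" ∨ p.2 = "disabled") ∨ some p.2 = fse)
           ∧ ¬ p.2 ∈ seen
        then some p.2 else none) (PySem.List.enumerate [x] (0 + l.length))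
        = if (¬ (x = "enabled" ∨ x = "disabled") ∨ some x = fse) ∧ ¬ x ∈ seen
          then [x] else [] := by
      rw [PySem.List.enumerate_cons, PySem.List.enumerate_nil]
      simp only [List.filterMap_cons, List.filterMap_nil]
      rw [hsl]
      simp only [List.not_mem_nil, not_false_iff, true_and]
      split_ifs <;> rfl
    have hcongr : ∀ p ∈ PySem.List.enumerate l 0,
        (if ¬ p.2 ∈ PySem.List.slice (l ++ [x]) (some (p.1 + 1)) none
            ∧ (¬ (p.2 = "enabled" ∨ p.2 = "disabled") ∨ some p.2 = fse)
            ∧ ¬ p.2 ∈ seen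
         then some p.2 else none)
        = (if ¬ p.2 ∈ PySem.List.slice l (some (p.1 + 1)) none
            ∧ (¬ (p.2 = "enabled" ∨ p.2 = "disabled") ∨ some p.2 = fse)
            ∧ ¬ p.2 ∈ (x :: seen)
           then some p.2 else none) := by
      intro p hp
      rcases (PySem.List.mem_enumerate_iff _ _ _).mp hp with ⟨k, hk, rfl⟩
      have hnn : (0 : Int) ≤ 0 + (k : Int) + 1 := by positivity
      have htn : ((0 : Int) + (k : Int) + 1).toNat = k + 1 := by omega
      have hd : PySem.List.slice (l ++ [x]) (some ((0 : Int) + k + 1)) none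
          = l.drop (k + 1) ++ [x] := by
        rw [PySem.List.slice_from _ hnn, htn, List.drop_append_of_le_length (by omega)]
      have hd2 : PySem.List.slice l (some ((0 : Int) + k + 1)) none = l.drop (k + 1) := by
        rw [PySem.List.slice_from _ hnn, htn]
      simp only [hd, hd2]
      refine if_congr ?_ rfl rfl
      simp only [List.mem_append, List.mem_cons]
      tauto
    rw [PySem.List.enumerate_append, List.filterMap_append, List.filterMap_congr hcongr, hx,
      List.reverse_append, List.reverse_append, List.reverse_cons, List.reverse_nil,
      List.nil_append, List.singleton_append]
    by_cases hxs : x ∈ seen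
    · rw [if_neg (by tauto)]
      rw [List.reverse_nil, List.nil_append, ih (x :: seen),
        coreR_congr fse (x :: seen) seen l.reverse (by
          intro e
          simp only [List.mem_cons]
          constructor
          · rintro (rfl | h)
            · exact hxs
            · exact h
          · exact Or.inr)]
      simp [coreR, hxs]
    · by_cases hok : ¬ (x = "enabled" ∨ x = "disabled") ∨ some x = fse
      · rw [if_pos ⟨hok, hxs⟩, List.reverse_cons, List.reverse_nil, List.nil_append,
          List.singleton_append, ih (x :: seen)]
        simp only [coreR, if_neg hxs]
        rw [if_neg (by tauto)]
      · rw [if_neg (by tauto), List.reverse_nil, List.nil_append, ih (x :: seen)]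
        simp only [coreR, if_neg hxs]
        rw [if_pos (by tauto)]

-- ===== A side: the dedup pass over a status-filtered list equals coreR =====

theorem dedup_filter (fse : Option String) (rl acc seen : List String)
    (h1 : ∀ e, ¬(e = "enabled" ∨ e = "disabled") → (e ∈ acc ↔ e ∈ seen))
    (h2 : ∀ e, (e = "enabled" ∨ e = "disabled") → some e = fse → e ∈ seen) :
    (rl.filter (fun e => !(e == "enabled" || e == "disabled"))).foldl aeDedupStep acc
      = acc ++ coreR fse seen rl := by
  induction rl generalizing acc seen with
  | nil => simp [coreR]
  | cons e t ih =>
    by_cases hst : e = "enabled" ∨ e = "disabled"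
    · have hf : (e :: t).filter (fun e => !(e == "enabled" || e == "disabled"))
          = t.filter (fun e => !(e == "enabled" || e == "disabled")) := by
        simp only [List.filter_cons]
        rw [if_neg (by rcases hst with h | h <;> simp [h])]
      rw [hf]
      by_cases hseen : e ∈ seen
      · rw [show coreR fse seen (e :: t) = coreR fse seen t by simp [coreR, hseen]]
        exact ih acc seen h1 h2
      · have hne : some e ≠ fse := fun hc => hseen (h2 e hst hc)
        rw [show coreR fse seen (e :: t) = coreR fse (e :: seen) t by
          simp only [coreR, if_neg hseen]; rw [if_pos ⟨hst, hne⟩]]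
        refine ih acc (e :: seen) ?_ ?_
        · intro e' he'
          rw [h1 e' he']
          have : e' ≠ e := fun hc => he' (hc ▸ hst)
          simp [this]
        · intro e' he' hfe
          exact List.mem_cons_of_mem _ (h2 e' he' hfe)
    · have hf : (e :: t).filter (fun e => !(e == "enabled" || e == "disabled"))
          = e :: t.filter (fun e => !(e == "enabled" || e == "disabled")) := by
        simp only [List.filter_cons]
        rw [if_pos (by simpa using hst)]
      rw [hf, List.foldl_cons]
      by_cases hacc : e ∈ acc
      · have hseen : e ∈ seen := (h1 e hst).mp hacc
        rw [show aeDedupStep acc e = acc by simp [aeDedupStep, hacc]]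
        rw [show coreR fse seen (e :: t) = coreR fse seen t by simp [coreR, hseen]]
        exact ih acc seen h1 h2
      · have hseen : ¬ e ∈ seen := fun hc => hacc ((h1 e hst).mpr hc)
        rw [show aeDedupStep acc e = acc ++ [e] by simp [aeDedupStep, hacc]]
        rw [show coreR fse seen (e :: t) = e :: coreR fse (e :: seen) t by
          simp only [coreR, if_neg hseen]; rw [if_neg (by tauto)]]
        rw [ih (acc ++ [e]) (e :: seen) ?_ ?_, List.append_assoc, List.singleton_append]
        · intro e' he'
          simp only [List.mem_append, List.mem_cons]
          rw [h1 e' he']; tauto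
        · intro e' he' hfe
          exact List.mem_cons_of_mem _ (h2 e' he' hfe)

-- A's keep-last-status scan once the status event has been found: drop every status event
theorem keep_found (fs : String) (rl acc : List String) :
    (rl.foldl (aeKeepStep fs) (acc, true)).1
      = acc ++ rl.filter (fun e => !(e == "enabled" || e == "disabled")) := by
  induction rl generalizing acc with
  | nil => simp
  | cons e t ih =>
    by_cases hst : e = "enabled" ∨ e = "disabled"
    · have : aeKeepStep fs (acc, true) e = (acc, true) := by simp [aeKeepStep, hst]
      rw [List.foldl_cons, this, ih acc, List.filter_cons,
        if_neg (by rcases hst with h | h <;> simp [h])]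
    · have : aeKeepStep fs (acc, true) e = (acc ++ [e], true) := by simp [aeKeepStep, hst]
      rw [List.foldl_cons, this, ih (acc ++ [e]), List.filter_cons,
        if_pos (by simpa using hst), List.append_assoc, List.singleton_append]

-- A's keep-last-status scan before the status event is found
def ffs (fs : String) : List String → List String
  | [] => []
  | e :: t =>
    if e = "enabled" ∨ e = "disabled" then
      (if e = fs then e :: t.filter (fun e => !(e == "enabled" || e == "disabled")) else ffs fs t)
    else e :: ffs fs t

theorem keep_notfound (fs : String) (rl acc : List String) :
    (rl.foldl (aeKeepStep fs) (acc, false)).1 = acc ++ ffs fs rl := by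
  induction rl generalizing acc with
  | nil => simp [ffs]
  | cons e t ih =>
    by_cases hst : e = "enabled" ∨ e = "disabled"
    · by_cases hfs : e = fs
      · have : aeKeepStep fs (acc, false) e = (acc ++ [e], true) := by
          subst hfs
          rcases hst with h | h <;> subst h <;> simp [aeKeepStep]
        rw [List.foldl_cons, this, keep_found, ffs, if_pos hst, if_pos hfs,
          List.append_assoc, List.singleton_append]
      · have : aeKeepStep fs (acc, false) e = (acc, false) := by
          rcases hst with h | h <;> subst h <;> simp [aeKeepStep, hfs]
        rw [List.foldl_cons, this, ih acc, ffs, if_pos hst, if_neg hfs]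
    · have : aeKeepStep fs (acc, false) e = (acc ++ [e], false) := by
        simp [aeKeepStep, hst]
      rw [List.foldl_cons, this, ih (acc ++ [e]), ffs, if_neg hst,
        List.append_assoc, List.singleton_append]

theorem dedup_ffs (fs : String) (hfs : fs = "enabled" ∨ fs = "disabled")
    (rl acc seen : List String)
    (h1 : ∀ e, ¬(e = "enabled" ∨ e = "disabled") → (e ∈ acc ↔ e ∈ seen))
    (h2 : ¬ fs ∈ acc) (h3 : ¬ fs ∈ seen) :
    (ffs fs rl).foldl aeDedupStep acc = acc ++ coreR (some fs) seen rl := by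
  induction rl generalizing acc seen with
  | nil => simp [ffs, coreR]
  | cons e t ih =>
    by_cases hst : e = "enabled" ∨ e = "disabled"
    · by_cases hefs : e = fs
      · subst hefs
        rw [ffs, if_pos hst, if_pos rfl, List.foldl_cons,
          show aeDedupStep acc e = acc ++ [e] by simp [aeDedupStep, h2]]
        rw [dedup_filter (some e) t (acc ++ [e]) (e :: seen) ?_ ?_]
        · rw [show coreR (some e) seen (e :: t) = e :: coreR (some e) (e :: seen) t by
            simp only [coreR, if_neg h3]; rw [if_neg (by tauto)]]
          rw [List.append_assoc, List.singleton_append]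
        · intro e' he'
          have : e' ≠ e := fun hc => he' (hc ▸ hst)
          simp only [List.mem_append, List.mem_cons, this]
          rw [h1 e' he']; tauto
        · intro e' _ hfe
          have : e' = e := by injection hfe
          simp [this]
      · rw [ffs, if_pos hst, if_neg hefs]
        by_cases hseen : e ∈ seen
        · rw [show coreR (some fs) seen (e :: t) = coreR (some fs) seen t by
            simp [coreR, hseen]]
          exact ih acc seen h1 h2 h3
        · rw [show coreR (some fs) seen (e :: t) = coreR (some fs) (e :: seen) t by
            simp only [coreR, if_neg hseen]
            rw [if_pos ⟨hst, by simp [hefs]⟩]]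
          refine ih acc (e :: seen) ?_ h2 ?_
          · intro e' he'
            have : e' ≠ e := fun hc => he' (hc ▸ hst)
            rw [h1 e' he']; simp [this]
          · simp only [List.mem_cons, not_or]
            exact ⟨fun hc => hefs hc.symm, h3⟩
    · rw [ffs, if_neg hst, List.foldl_cons]
      have hfe : fs ≠ e := fun hc => hst (hc ▸ hfs)
      by_cases hacc : e ∈ acc
      · have hseen : e ∈ seen := (h1 e hst).mp hacc
        rw [show aeDedupStep acc e = acc by simp [aeDedupStep, hacc],
          show coreR (some fs) seen (e :: t) = coreR (some fs) seen t by simp [coreR, hseen]]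
        exact ih acc seen h1 h2 h3
      · have hseen : ¬ e ∈ seen := fun hc => hacc ((h1 e hst).mpr hc)
        rw [show aeDedupStep acc e = acc ++ [e] by simp [aeDedupStep, hacc],
          show coreR (some fs) seen (e :: t) = e :: coreR (some fs) (e :: seen) t by
            simp only [coreR, if_neg hseen]; rw [if_neg (by tauto)]]
        rw [ih (acc ++ [e]) (e :: seen) ?_ ?_ ?_, List.append_assoc, List.singleton_append]
        · intro e' he'
          simp only [List.mem_append, List.mem_cons]
          rw [h1 e' he']; tauto
        · simp only [List.mem_append, not_or]
          exact ⟨h2, by simp [hfe]⟩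
        · simp only [List.mem_cons, not_or]
          exact ⟨hfe, h3⟩

-- A's whole tail equals coreR (reversed)
theorem a_tail (events : List String) :
    aggregate_events events
      = (coreR (events.foldl aeStep none) [] events.reverse).reverse := by
  unfold aggregate_events
  rcases state_mem events none (Or.inl rfl) with h | h | h <;> rw [h]
  · simp only []
    rw [← List.filter_reverse, dedup_filter none events.reverse [] []
      (by intro e _; rfl) (by intro e _ hc; cases hc), List.nil_append]
  · simp only [List.reverse_reverse]
    rw [keep_notfound, List.nil_append,
      dedup_ffs "enabled" (Or.inl rfl) events.reverse [] []
        (by intro e _; rfl) (by simp) (by simp), List.nil_append]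
  · simp only [List.reverse_reverse]
    rw [keep_notfound, List.nil_append,
      dedup_ffs "disabled" (Or.inr rfl) events.reverse [] []
        (by intro e _; rfl) (by simp) (by simp), List.nil_append]

-- B's whole body equals coreR (reversed)
theorem b_tail (events : List String) :
    aggregate_events_alt events
      = (coreR (events.foldl altStep none) [] events.reverse).reverse := by
  show (PySem.List.enumerate events 0).filterMap (fun p =>
      if ¬ p.2 ∈ PySem.List.slice events (some (p.1 + 1)) none
         ∧ (¬ (p.2 = "enabled" ∨ p.2 = "disabled") ∨ some p.2 = events.foldl altStep none)
      then some p.2 else none) = _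
  rw [← b_gen (events.foldl altStep none) events [], List.reverse_reverse]
  apply List.filterMap_congr
  intro p _
  simp

-- ===== VERDICT (by name: the statement is the Claim_ definition above) =====
theorem aggregate_events_spec : Claim_equal_aggregate_events := by
  intro events _ _
  show aggregate_events events = aggregate_events_alt events
  rw [a_tail, b_tail, state_lemma events none (Or.inl rfl)]
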